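-- pv_equiv track=rewrite | github.com/24shiny/Quantum-transpilation | final/runtime/qco_level_3.py | find_multiple_sequences
-- ===== SOURCE A (Python) =====
-- def find_multiple_sequences(main_list):
--     found_matches = []
--     len_main = len(main_list)
--     targets = [['Hadamard', 'CZ', 'Hadamard'],['Hadamard', 'CNOT', 'Hadamard'],['PauliX', 'CNOT', 'PauliX']]
--
--     for sub_sequence in targets:
--         len_sub = len(sub_sequence)
--         if len_sub > len_main:
--             continue
--         for i in range(len_main - len_sub + 1):
--             window = main_list[i : i + len_sub]
--             if window == sub_sequence:
--                 found_matches.append(sub_sequence)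
--                 break
--     if len(found_matches) == 0:
--         return False
--     else:
--         return True
-- ===== SOURCE B (Python) =====
-- _TARGETS = {('Hadamard', 'CZ', 'Hadamard'),
--             ('Hadamard', 'CNOT', 'Hadamard'),
--             ('PauliX', 'CNOT', 'PauliX')}
--
--
-- def find_multiple_sequences(main_list):
--     for window in zip(main_list, main_list[1:], main_list[2:]):
--         if window in _TARGETS:
--             return True
--     return False
-- ===== Notes on version B (the rewrite author's own statement) =====
-- stated objective: simpler
-- what changed: A scans the whole list once per target (outer loop over the three targets, inner loop over all window positions with slicing); B makes a single sliding-window pass over the list, checking each consecutive triple against a precomputed set of the three targets.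
import Mathlib
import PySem

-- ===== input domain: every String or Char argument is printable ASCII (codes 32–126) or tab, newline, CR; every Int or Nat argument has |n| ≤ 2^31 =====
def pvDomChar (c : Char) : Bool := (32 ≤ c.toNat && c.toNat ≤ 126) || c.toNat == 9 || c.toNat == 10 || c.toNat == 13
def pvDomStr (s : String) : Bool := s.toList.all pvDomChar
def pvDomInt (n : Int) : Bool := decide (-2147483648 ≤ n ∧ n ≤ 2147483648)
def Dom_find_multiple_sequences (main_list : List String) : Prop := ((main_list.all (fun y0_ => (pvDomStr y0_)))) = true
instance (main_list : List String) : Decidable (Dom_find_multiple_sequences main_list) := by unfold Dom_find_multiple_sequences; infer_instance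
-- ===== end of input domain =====

-- B replaces A's per-target scans (three passes over the list) by one sliding-window
-- pass with a set lookup of the three target triples; return value only, no mutation.

-- ===== PORT A =====
-- inner loop 'for i in range(...): window = main_list[i:i+len_sub]; if window == sub: ... break'
def fms_scan (main_list sub : List String) : List Int → Bool
  | [] => false
  | i :: rest =>
      if PySem.List.slice main_list (some i) (some (i + (sub.length : Int))) == sub then true
      else fms_scan main_list sub rest

-- body of 'for sub_sequence in targets' for one target (continue when len_sub > len_main)
def fms_found (main_list sub : List String) : Bool :=
  if ((sub.length : Int)) > ((main_list.length : Int)) then false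
  else fms_scan main_list sub (PySem.List.pyRange 0 ((main_list.length : Int) - (sub.length : Int) + 1) 1)

def find_multiple_sequences (main_list : List String) : Bool :=
  let targets : List (List String) :=
    [["Hadamard", "CZ", "Hadamard"], ["Hadamard", "CNOT", "Hadamard"], ["PauliX", "CNOT", "PauliX"]]
  let found_matches : List (List String) :=
    targets.foldl (fun acc sub => if fms_found main_list sub then acc ++ [sub] else acc) []
  if found_matches.length = 0 then false else true

-- ===== PORT B =====
-- the precomputed set _TARGETS of Source B
def fms_targets : PySem.Set (String × String × String) :=
  PySem.Set.ofList
    [("Hadamard", "CZ", "Hadamard"), ("Hadamard", "CNOT", "Hadamard"), ("PauliX", "CNOT", "PauliX")]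

-- 'for window in zip(main_list, main_list[1:], main_list[2:])' visits the consecutive
-- triples in order; the structural recursion below walks exactly those windows (exact).
def find_multiple_sequences_alt : List String → Bool
  | a :: b :: c :: rest =>
      if PySem.Set.contains fms_targets (a, b, c) then true
      else find_multiple_sequences_alt (b :: c :: rest)
  | _ => false

-- ===== PRECONDITION & SPEC =====
def Spec_find_multiple_sequences (main_list : List String) (out : Bool) : Prop := out = find_multiple_sequences_alt main_list
instance (main_list : List String) (out : Bool) : Decidable (Spec_find_multiple_sequences main_list out) := by unfold Spec_find_multiple_sequences; infer_instance

-- ===== CLAIM (what is proved, stated in full; the proofs are below) =====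
def Claim_equal_find_multiple_sequences : Prop := ∀ (main_list : List String), Dom_find_multiple_sequences main_list → Spec_find_multiple_sequences main_list (find_multiple_sequences main_list)

-- ===== LEMMAS AND PROOFS =====

-- A's inner loop is an 'any' over the index list
theorem fms_scan_eq_any (main_list sub : List String) (is : List Int) :
    fms_scan main_list sub is =
      is.any (fun i => PySem.List.slice main_list (some i) (some (i + (sub.length : Int))) == sub) := by
  induction is with
  | nil => rfl
  | cons i rest ih =>
      simp only [fms_scan, List.any_cons, ← ih]
      split_ifs with h <;> simp [h]

-- one target scan finds sub iff some window equals sub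
theorem fms_found_iff (main_list sub : List String) (hs : sub.length = 3) :
    fms_found main_list sub = true ↔ ∃ j : Nat, (main_list.drop j).take 3 = sub := by
  unfold fms_found
  split_ifs with hg
  · simp only [false_iff]
    rintro ⟨j, hj⟩
    have := congrArg List.length hj
    simp [hs] at this
    omega
  · rw [fms_scan_eq_any, List.any_eq_true]
    constructor
    · rintro ⟨i, hi, hsl⟩
      rw [PySem.List.mem_pyRange_one] at hi
      obtain ⟨h0, _⟩ := hi
      refine ⟨i.toNat, ?_⟩
      have hcast : ((i.toNat : Nat) : Int) = i := Int.toNat_of_nonneg h0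
      rw [← hcast, PySem.List.slice_natCast_add, hs] at hsl
      exact (beq_iff_eq.mp hsl)
    · rintro ⟨j, hj⟩
      refine ⟨(j : Int), ?_, ?_⟩
      · rw [PySem.List.mem_pyRange_one]
        have := congrArg List.length hj
        simp [hs] at this
        constructor
        · exact Int.natCast_nonneg j
        · omega
      · rw [PySem.List.slice_natCast_add, hs]
        exact beq_iff_eq.mpr hj

-- B finds a window iff some window is one of the three targets
theorem fms_alt_iff (main_list : List String) :
    find_multiple_sequences_alt main_list = true ↔
      ∃ j : Nat, (main_list.drop j).take 3 = ["Hadamard", "CZ", "Hadamard"]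
        ∨ (main_list.drop j).take 3 = ["Hadamard", "CNOT", "Hadamard"]
        ∨ (main_list.drop j).take 3 = ["PauliX", "CNOT", "PauliX"] := by
  fun_induction find_multiple_sequences_alt main_list with
  | case1 a b c rest h =>
      simp only [fms_targets, PySem.Set.contains_iff, PySem.Set.mem_ofList,
        List.mem_cons, List.not_mem_nil, or_false, Prod.mk.injEq] at h
      constructor
      · intro _
        refine ⟨0, ?_⟩
        simp only [List.drop_zero]
        rcases h with ⟨h1, h2, h3⟩ | ⟨h1, h2, h3⟩ | ⟨h1, h2, h3⟩ <;> subst h1 <;> subst h2 <;> subst h3 <;> simp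
      · intro _; rfl
  | case2 a b c rest h ih =>
      rw [ih]
      constructor
      · rintro ⟨j, hj⟩
        exact ⟨j + 1, by simpa [List.drop_succ_cons] using hj⟩
      · rintro ⟨j, hj⟩
        cases j with
        | succ j => exact ⟨j, by simpa [List.drop_succ_cons] using hj⟩
        | zero =>
            exfalso
            apply h
            simp only [List.drop_zero, List.take_succ_cons, List.take_zero] at hj
            simp only [List.cons.injEq, and_true] at hj
            rcases hj with ⟨h1, h2, h3⟩ | ⟨h1, h2, h3⟩ | ⟨h1, h2, h3⟩ <;> subst h1 <;> subst h2 <;> subst h3 <;> decide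
  | case3 t hshape =>
      have hlen : t.length ≤ 2 := by
        rcases t with _ | ⟨a, _ | ⟨b, _ | ⟨c, r⟩⟩⟩
        · simp
        · simp
        · simp
        · exact absurd rfl (by exact fun hh => hshape a b c r hh)
      simp only [Bool.false_eq_true, false_iff]
      rintro ⟨j, hj⟩
      rcases hj with hj | hj | hj <;>
        · have := congrArg List.length hj
          simp at this
          omega

-- A's outer loop over the three targets
theorem fms_top (main_list : List String) :
    find_multiple_sequences main_list =
      (fms_found main_list ["Hadamard", "CZ", "Hadamard"]
        || fms_found main_list ["Hadamard", "CNOT", "Hadamard"]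
        || fms_found main_list ["PauliX", "CNOT", "PauliX"]) := by
  unfold find_multiple_sequences
  simp only [List.foldl]
  split_ifs <;> simp_all

-- ===== VERDICT (by name: the statement is the Claim_ definition above) =====
theorem find_multiple_sequences_spec : Claim_equal_find_multiple_sequences := by
  intro ml _
  unfold Spec_find_multiple_sequences
  rw [fms_top, Bool.eq_iff_iff]
  simp only [Bool.or_eq_true,
    fms_found_iff ml ["Hadamard", "CZ", "Hadamard"] rfl,
    fms_found_iff ml ["Hadamard", "CNOT", "Hadamard"] rfl,
    fms_found_iff ml ["PauliX", "CNOT", "PauliX"] rfl,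
    fms_alt_iff]
  rw [← exists_or, ← exists_or]
  exact exists_congr (fun j => by tauto)
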